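-- pv_equiv track=rewrite | github.com/Lut-Lat-Aung/ComputerScience_SchoolWork | Algorithm Design/Final Exam/Sem 1/question6.py | countTilingPatterns
-- ===== SOURCE A (Python) =====
-- def countTilingPatterns(L):
--     if L == 0:
--         return 1
--     elif L == 2:
--         return 3
--
--     MOD = 44711
--     f = [0] * (L + 1)
--     f[0] = 1
--     f[2] = 3
--
--     for i in range(4, L + 1, 2):
--         f[i] = (4 * f[i - 2] - f[i - 4]) % MOD
--
--     return f[L]
-- ===== SOURCE B (Python) =====
-- def countTilingPatterns(L):
--     # Tilings of a 3 x L board: f(2k) satisfies g(k) = 4*g(k-1) - g(k-2) mod 44711.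
--     # Computed by binary matrix exponentiation of [[4,-1],[1,0]] in O(log L).
--     if L < 0 or L % 2 != 0:
--         return 0
--     MOD = 44711
--     n = L // 2
--     # accumulator starts as the identity; base is [[4, -1], [1, 0]] mod MOD
--     a, b, c, d = 1, 0, 0, 1
--     x, y, z, w = 4, MOD - 1, 1, 0
--     while n:
--         if n % 2 == 1:
--             a, b, c, d = ((a * x + b * z) % MOD, (a * y + b * w) % MOD,
--                           (c * x + d * z) % MOD, (c * y + d * w) % MOD)
--         x, y, z, w = ((x * x + y * z) % MOD, (x * y + y * w) % MOD,
--                       (z * x + w * z) % MOD, (z * y + w * w) % MOD)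
--         n = n // 2
--     # [g(n+1), g(n)] = M^n . [3, 1]  =>  g(n) = c*3 + d*1
--     return (c * 3 + d) % MOD
-- ===== Notes on version B (the rewrite author's own statement) =====
-- stated objective: faster
-- what changed: Replaces A's O(L) dynamic-programming array over f[0..L] with binary exponentiation of the 2x2 matrix [[4,-1],[1,0]] mod 44711, computing the same two-term recurrence value in O(log L) multiplications.
import Mathlib
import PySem

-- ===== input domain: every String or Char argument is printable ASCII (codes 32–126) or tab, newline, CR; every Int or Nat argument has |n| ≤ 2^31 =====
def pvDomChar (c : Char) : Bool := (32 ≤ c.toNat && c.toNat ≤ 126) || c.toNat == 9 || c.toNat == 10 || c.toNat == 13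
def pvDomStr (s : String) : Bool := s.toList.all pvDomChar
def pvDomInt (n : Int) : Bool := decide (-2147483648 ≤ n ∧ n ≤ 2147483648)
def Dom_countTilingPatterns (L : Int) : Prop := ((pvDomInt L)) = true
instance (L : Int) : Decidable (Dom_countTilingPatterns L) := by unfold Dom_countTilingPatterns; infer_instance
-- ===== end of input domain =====

-- B replaces A's O(L) dynamic-programming array with binary matrix exponentiation of the
-- 2-term recurrence mod 44711 (O(log L)); equivalence of the return values is proved below.

-- ===== PORT A =====
-- Python's f[i] read / f[i] = v on the DP array, kept as an Array for O(1) access;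
-- hand-ported: exact for the nonnegative in-range indices that occur under Pre_
-- (proved equal to PySem.List.pyGetD / pySetD on those indices below)
def pyGetDA (a : Array Int) (i : Int) (d : Int) : Int := a.getD i.toNat d
def pySetDA (a : Array Int) (i : Int) (v : Int) : Array Int := a.setIfInBounds i.toNat v

-- loop body of 'for i in range(4, L + 1, 2): f[i] = (4 * f[i - 2] - f[i - 4]) % MOD'
def stepA (f : Array Int) (i : Int) : Array Int :=
  pySetDA f i (PySem.Int.mod (4 * pyGetDA f (i - 2) 0 - pyGetDA f (i - 4) 0) 44711)

def countTilingPatterns (L : Int) : Int :=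
  if L = 0 then 1
  else if L = 2 then 3
  else
    -- f = [0] * (L + 1); f[0] = 1; f[2] = 3  (in-range under Pre_)
    let f0 : Array Int := Array.replicate (L + 1).toNat 0
    let f1 : Array Int := pySetDA f0 0 1
    let f2 : Array Int := pySetDA f1 2 3
    let f3 : Array Int := (PySem.List.pyRange 4 (L + 1) 2).foldl stepA f2
    pyGetDA f3 L 0

-- ===== PORT B =====
-- 2x2 matrices as quadruples (a, b, c, d); multiplication mod 44711
def mulM (p q : Int × Int × Int × Int) : Int × Int × Int × Int :=
  ( PySem.Int.mod (p.1 * q.1 + p.2.1 * q.2.2.1) 44711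
  , PySem.Int.mod (p.1 * q.2.1 + p.2.1 * q.2.2.2) 44711
  , PySem.Int.mod (p.2.2.1 * q.1 + p.2.2.2 * q.2.2.1) 44711
  , PySem.Int.mod (p.2.2.1 * q.2.1 + p.2.2.2 * q.2.2.2) 44711 )

-- the identity matrix: 'a, b, c, d = 1, 0, 0, 1'
def idQ : Int × Int × Int × Int := (1, 0, 0, 1)

-- 'while n: if n % 2 == 1: acc = acc*base; base = base*base; n //= 2'
-- (structural recursion on a fuel counter initialised to n; n halves each turn, so
--  fuel n suffices and the loop is computed exactly)
def powLoop : Nat → Nat → Int × Int × Int × Int → Int × Int × Int × Int →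
    Int × Int × Int × Int
  | 0, _, acc, _ => acc
  | fuel + 1, n, acc, base =>
      if n = 0 then acc
      else powLoop fuel (n / 2) (if n % 2 = 1 then mulM acc base else acc) (mulM base base)

def countTilingPatterns_alt (L : Int) : Int :=
  if L < 0 ∨ PySem.Int.mod L 2 ≠ 0 then 0
  else
    let n : Nat := (PySem.Int.floordiv L 2).toNat
    let r := powLoop n n idQ (4, 44710, 1, 0)
    PySem.Int.mod (r.2.2.1 * 3 + r.2.2.2) 44711

-- ===== PRECONDITION & SPEC =====
-- Pre_ excludes exactly the inputs where A raises IndexError: L < 0 (empty f, 'f[0] = 1'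
-- fails) and L = 1 ('f[2] = 3' fails); A returns a value on everything else (B returns 0 there).
def Pre_countTilingPatterns (L : Int) : Prop := 0 ≤ L ∧ L ≠ 1
instance (L : Int) : Decidable (Pre_countTilingPatterns L) := by
  unfold Pre_countTilingPatterns; infer_instance
def pvWitness_countTilingPatterns : Int := 6

def Spec_countTilingPatterns (L : Int) (out : Int) : Prop := out = countTilingPatterns_alt L
instance (L : Int) (out : Int) : Decidable (Spec_countTilingPatterns L out) := by
  unfold Spec_countTilingPatterns; infer_instance

-- ===== CLAIM (what is proved, stated in full; the proofs are below) =====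
def Claim_equal_countTilingPatterns : Prop :=
  ∀ (L : Int), Dom_countTilingPatterns L → Pre_countTilingPatterns L →
    Spec_countTilingPatterns L (countTilingPatterns L)

-- ===== LEMMAS AND PROOFS =====

-- the mathematical sequence: G k = number of tilings of width 2k, mod 44711
def G : Nat → Int
  | 0 => 1
  | 1 => 3
  | n + 2 => (4 * G (n + 1) - G n) % 44711

-- the common value both programs compute
def tileVal (L : Int) : Int := if L % 2 = 0 then G (L / 2).toNat else 0

-- ---- B side: matrix-power algebra mod 44711 ----

def rmul (p q : Int × Int × Int × Int) : Int × Int × Int × Int :=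
  ( p.1 * q.1 + p.2.1 * q.2.2.1
  , p.1 * q.2.1 + p.2.1 * q.2.2.2
  , p.2.2.1 * q.1 + p.2.2.2 * q.2.2.1
  , p.2.2.1 * q.2.1 + p.2.2.2 * q.2.2.2 )

def red (p : Int × Int × Int × Int) : Int × Int × Int × Int :=
  (p.1 % 44711, p.2.1 % 44711, p.2.2.1 % 44711, p.2.2.2 % 44711)

def mpow (b : Int × Int × Int × Int) : Nat → Int × Int × Int × Int
  | 0 => idQ
  | n + 1 => mulM (mpow b n) b

lemma mulM_eq (p q : Int × Int × Int × Int) : mulM p q = red (rmul p q) := by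
  simp [mulM, rmul, red]

lemma absorb (a b x z : Int) :
    (a % 44711 * x + b % 44711 * z) % 44711 = (a * x + b * z) % 44711 := by
  conv_rhs => rw [Int.add_emod, Int.mul_emod a x, Int.mul_emod b z]
  conv_lhs => rw [Int.add_emod, Int.mul_emod (a % 44711) x, Int.mul_emod (b % 44711) z]
  rw [Int.emod_emod_of_dvd _ dvd_rfl, Int.emod_emod_of_dvd _ dvd_rfl]

lemma absorb' (a b x z : Int) :
    (a * (x % 44711) + b * (z % 44711)) % 44711 = (a * x + b * z) % 44711 := by
  conv_rhs => rw [Int.add_emod, Int.mul_emod a x, Int.mul_emod b z]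
  conv_lhs => rw [Int.add_emod, Int.mul_emod a (x % 44711), Int.mul_emod b (z % 44711)]
  rw [Int.emod_emod_of_dvd _ dvd_rfl, Int.emod_emod_of_dvd _ dvd_rfl]

lemma red_rmul_left (p q : Int × Int × Int × Int) :
    red (rmul (red p) q) = red (rmul p q) := by
  obtain ⟨a, b, c, d⟩ := p; obtain ⟨x, y, z, w⟩ := q
  simp only [red, rmul, Prod.mk.injEq]
  exact ⟨absorb .., absorb .., absorb .., absorb ..⟩

lemma red_rmul_right (p q : Int × Int × Int × Int) :
    red (rmul p (red q)) = red (rmul p q) := by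
  obtain ⟨a, b, c, d⟩ := p; obtain ⟨x, y, z, w⟩ := q
  simp only [red, rmul, Prod.mk.injEq]
  exact ⟨absorb' .., absorb' .., absorb' .., absorb' ..⟩

lemma rmul_assoc (p q r : Int × Int × Int × Int) :
    rmul (rmul p q) r = rmul p (rmul q r) := by
  obtain ⟨a, b, c, d⟩ := p; obtain ⟨x, y, z, w⟩ := q; obtain ⟨e, f, g, h⟩ := r
  simp only [rmul, Prod.mk.injEq]
  exact ⟨by ring, by ring, by ring, by ring⟩

lemma mulM_assoc (p q r : Int × Int × Int × Int) :
    mulM (mulM p q) r = mulM p (mulM q r) := by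
  rw [mulM_eq p q, mulM_eq _ r, mulM_eq q r, mulM_eq p _,
      red_rmul_left, red_rmul_right, rmul_assoc]

lemma rmul_id_left (q : Int × Int × Int × Int) : rmul idQ q = q := by
  obtain ⟨x, y, z, w⟩ := q; simp [rmul, idQ]

lemma rmul_id_right (q : Int × Int × Int × Int) : rmul q idQ = q := by
  obtain ⟨x, y, z, w⟩ := q; simp [rmul, idQ]

lemma mulM_id_left (q : Int × Int × Int × Int) : mulM idQ q = red q := by
  rw [mulM_eq, rmul_id_left]

lemma mulM_red_right (p q : Int × Int × Int × Int) : mulM p (red q) = mulM p q := by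
  rw [mulM_eq, mulM_eq, red_rmul_right]

lemma mpow_sq (b : Int × Int × Int × Int) (q : Nat) :
    mpow (mulM b b) q = mpow b (2 * q) := by
  induction q with
  | zero => rfl
  | succ q ih =>
      show mulM (mpow (mulM b b) q) (mulM b b) = mpow b (2 * q + 1 + 1)
      rw [ih, mpow, mpow, mulM_assoc]

lemma mpow_comm (b : Int × Int × Int × Int) (n : Nat) :
    mulM (mpow b n) b = mulM b (mpow b n) := by
  induction n with
  | zero => rw [mpow, mulM_id_left, mulM_eq, rmul_id_right]
  | succ n ih =>
      show mulM (mulM (mpow b n) b) b = mulM b (mulM (mpow b n) b)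
      rw [ih, mulM_assoc, ih]

lemma powLoop_zero (fuel : Nat) (acc b : Int × Int × Int × Int) :
    powLoop fuel 0 acc b = acc := by
  cases fuel <;> simp [powLoop]

lemma powLoop_eq (fuel n : Nat) (acc b : Int × Int × Int × Int) (hf : n ≤ fuel)
    (hn : n ≠ 0) : powLoop fuel n acc b = mulM acc (mpow b n) := by
  induction fuel generalizing n acc b with
  | zero => omega
  | succ fuel ih =>
    by_cases h2 : n / 2 = 0
    · have hn1 : n = 1 := by omega
      subst hn1
      have h1 : mpow b 1 = red b := by rw [mpow, mpow, mulM_id_left]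
      show (if (1:Nat) = 0 then acc
            else powLoop fuel (1 / 2) (if 1 % 2 = 1 then mulM acc b else acc)
              (mulM b b)) = _
      rw [if_neg (by omega)]
      norm_num
      rw [powLoop_zero, h1, mulM_red_right]
    · by_cases hodd : n % 2 = 1
      · obtain ⟨q, rfl⟩ : ∃ q, n = 2 * q + 1 := ⟨n / 2, by omega⟩
        have hq2 : (2 * q + 1) / 2 = q := by omega
        show (if 2 * q + 1 = 0 then acc
              else powLoop fuel ((2 * q + 1) / 2)
                (if (2 * q + 1) % 2 = 1 then mulM acc b else acc) (mulM b b)) = _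
        rw [if_neg hn, if_pos hodd, hq2,
            ih q _ _ (by omega) (by omega), mpow_sq, mpow, mulM_assoc, ← mpow_comm]
      · obtain ⟨q, rfl⟩ : ∃ q, n = 2 * q := ⟨n / 2, by omega⟩
        have hq2 : 2 * q / 2 = q := by omega
        show (if 2 * q = 0 then acc
              else powLoop fuel (2 * q / 2)
                (if (2 * q) % 2 = 1 then mulM acc b else acc) (mulM b b)) = _
        rw [if_neg hn, if_neg hodd, hq2,
            ih q _ _ (by omega) (by omega), mpow_sq]

-- ---- B side: the bottom row of mpow TQ n carries G ----

lemma key (c0 d0 : Int) :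
    ((((c0 * 4 + d0 * 1) % 44711) * 4 + ((c0 * 44710 + d0 * 0) % 44711) * 1) % 44711 * 3 +
      (((c0 * 4 + d0 * 1) % 44711) * 44710 + ((c0 * 44710 + d0 * 0) % 44711) * 0) % 44711) % 44711
    = (4 * ((((c0 * 4 + d0 * 1) % 44711) * 3 + ((c0 * 44710 + d0 * 0) % 44711)) % 44711) -
        (c0 * 3 + d0) % 44711) % 44711 := by
  omega

lemma mpow_T_succ (n : Nat) :
    mpow (4, 44710, 1, 0) (n + 1) =
      ( ((mpow (4, 44710, 1, 0) n).1 * 4 + (mpow (4, 44710, 1, 0) n).2.1 * 1) % 44711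
      , ((mpow (4, 44710, 1, 0) n).1 * 44710 + (mpow (4, 44710, 1, 0) n).2.1 * 0) % 44711
      , ((mpow (4, 44710, 1, 0) n).2.2.1 * 4 + (mpow (4, 44710, 1, 0) n).2.2.2 * 1) % 44711
      , ((mpow (4, 44710, 1, 0) n).2.2.1 * 44710 + (mpow (4, 44710, 1, 0) n).2.2.2 * 0) % 44711 ) := by
  rw [mpow, mulM_eq]; rfl

lemma mpow_T_val : ∀ n : Nat,
    ((mpow (4, 44710, 1, 0) n).2.2.1 * 3 + (mpow (4, 44710, 1, 0) n).2.2.2) % 44711 = G n := by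
  intro n
  induction n using Nat.twoStepInduction with
  | zero => decide
  | one => decide
  | more n ih1 ih2 =>
      rw [G, ← ih2, ← ih1, mpow_T_succ (n + 1), mpow_T_succ n]
      dsimp only
      exact key ((mpow (4, 44710, 1, 0) n).2.2.1) ((mpow (4, 44710, 1, 0) n).2.2.2)

-- ---- A side: bridging the Array operations to their PySem List forms ----

lemma arr_getD_toList (a : Array Int) (n : Nat) (d : Int) : a.getD n d = a.toList.getD n d := by
  rw [Array.getD, List.getD_eq_getElem?_getD]
  split
  · next h => simp [List.getElem?_eq_getElem (by simpa using h)]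
  · next h => simp [List.getElem?_eq_none (by simpa using (Nat.le_of_not_lt h))]

lemma getDA_toList (a : Array Int) (i d : Int) (h0 : 0 ≤ i) :
    pyGetDA a i d = PySem.List.pyGetD a.toList i d := by
  rw [pyGetDA, arr_getD_toList, ← PySem.List.pyGetD_natCast, Int.toNat_of_nonneg h0]

lemma setDA_toList (a : Array Int) (i v : Int) (h0 : 0 ≤ i) :
    (pySetDA a i v).toList = PySem.List.pySetD a.toList i v := by
  rw [pySetDA, Array.toList_setIfInBounds, PySem.List.pySetD_of_nonneg _ _ h0]

-- the loop body at the PySem List level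
def stepAL (f : List Int) (i : Int) : List Int :=
  PySem.List.pySetD f i
    (PySem.Int.mod (4 * PySem.List.pyGetD f (i - 2) 0 - PySem.List.pyGetD f (i - 4) 0) 44711)

lemma stepA_toList (f : Array Int) (i : Int) (h : (4:Int) ≤ i) :
    (stepA f i).toList = stepAL f.toList i := by
  rw [stepA, stepAL, getDA_toList _ _ _ (by omega), getDA_toList _ _ _ (by omega),
      setDA_toList _ _ _ (by omega)]

-- ---- A side: the DP array after j loop iterations ----

def f2A (N : Nat) : List Int :=
  PySem.List.pySetD (PySem.List.pySetD (List.replicate (N + 1) 0) 0 1) 2 3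

def FA (N j : Nat) : List Int :=
  (List.map (fun k : Nat => (4:Int) + 2 * (k:Int)) (List.range j)).foldl stepAL (f2A N)

-- intended content of f[t] after j iterations
def valA (j t : Nat) : Int :=
  if t % 2 = 1 then 0 else if t ≤ 2 * j + 2 then G (t / 2) else 0

lemma FA_succ (N j : Nat) : FA N (j + 1) = stepAL (FA N j) (4 + 2 * (j:Int)) := by
  simp [FA, List.range_succ]

-- the Array fold of port A projects to the List-level FA
lemma FA_toList (N j : Nat) :
    (List.foldl stepA (pySetDA (pySetDA (Array.replicate (N + 1) 0) 0 1) 2 3)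
      (List.map (fun k : Nat => (4:Int) + 2 * (k:Int)) (List.range j))).toList = FA N j := by
  induction j with
  | zero =>
      rw [List.range_zero, List.map_nil, List.foldl_nil, FA, List.range_zero, List.map_nil,
          List.foldl_nil, f2A, setDA_toList _ _ _ (by omega), setDA_toList _ _ _ (by omega)]
      simp
  | succ j ih =>
      rw [List.range_succ, List.map_append, List.foldl_append, List.map_cons, List.map_nil,
          List.foldl_cons, List.foldl_nil, stepA_toList _ _ (by omega), ih, FA_succ]

lemma FA_len (N j : Nat) : (FA N j).length = N + 1 := by
  induction j with
  | zero => simp [FA, f2A, PySem.List.length_pySetD]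
  | succ j ih => rw [FA_succ, stepAL, PySem.List.length_pySetD, ih]

lemma get_f2A (N t : Nat) (hN : 3 ≤ N) (ht : t ≤ N) :
    PySem.List.pyGetD (f2A N) (t:Int) 0 = valA 0 t := by
  have c0 : (0:Int) = ((0:Nat):Int) := rfl
  have c2 : (2:Int) = ((2:Nat):Int) := rfl
  rw [f2A, c2, c0,
      PySem.List.pyGetD_pySetD_natCast _ 2 t 3 _
        (by rw [PySem.List.length_pySetD, List.length_replicate]; omega),
      PySem.List.pyGetD_pySetD_natCast _ 0 t 1 _
        (by rw [List.length_replicate]; omega)]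
  unfold valA
  by_cases h2 : t = 2
  · subst h2; norm_num [G]
  · rw [if_neg h2]
    by_cases h0 : t = 0
    · subst h0; norm_num [G]
    · rw [if_neg h0, PySem.List.pyGetD_natCast,
          show (if t % 2 = 1 then (0:Int) else if t ≤ 2 * 0 + 2 then G (t / 2) else 0) = 0
            from by split_ifs <;> omega]
      have htl : t < N + 1 := by omega
      simp [List.getD, htl]

lemma FA_get (N : Nat) (hN : 3 ≤ N) :
    ∀ j, 2 * j + 2 ≤ N → ∀ t, t ≤ N →
      PySem.List.pyGetD (FA N j) (t:Int) 0 = valA j t := by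
  intro j
  induction j with
  | zero => intro _ t ht; exact get_f2A N t hN ht
  | succ j ih =>
    intro hj t ht
    have ihj : ∀ t, t ≤ N → PySem.List.pyGetD (FA N j) (t:Int) 0 = valA j t :=
      fun t ht => ih (by omega) t ht
    have e1 : (4:Int) + 2 * (j:Int) - 2 = ((2 * j + 2 : Nat):Int) := by push_cast; ring
    have e2 : (4:Int) + 2 * (j:Int) - 4 = ((2 * j : Nat):Int) := by push_cast; ring
    have v1 : valA j (2 * j + 2) = G (j + 1) := by
      unfold valA
      rw [if_neg (by omega), if_pos (by omega)]
      congr 1; omega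
    have v2 : valA j (2 * j) = G j := by
      unfold valA
      rw [if_neg (by omega), if_pos (by omega)]
      congr 1; omega
    have e0 : (4:Int) + 2 * (j:Int) = ((4 + 2 * j : Nat):Int) := by push_cast; ring
    rw [FA_succ, stepAL, e1, e2, ihj (2 * j + 2) (by omega), ihj (2 * j) (by omega),
        v1, v2, PySem.Int.mod_eq_emod_of_pos (by norm_num : (0:Int) < 44711),
        show (4 * G (j + 1) - G j) % 44711 = G (j + 2) from (by rw [G]), e0,
        PySem.List.pyGetD_pySetD_natCast _ _ t _ 0 (by rw [FA_len]; omega)]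
    by_cases ht4 : t = 4 + 2 * j
    · rw [if_pos ht4]
      unfold valA
      rw [if_neg (by omega), if_pos (by omega)]
      congr 1; omega
    · rw [if_neg ht4, ihj t ht]
      unfold valA
      split_ifs <;> first | rfl | omega

lemma lemA : ∀ (L : Int), 0 ≤ L → L ≠ 1 → countTilingPatterns L = tileVal L := by
  intro L hL hne1
  by_cases h0 : L = 0
  · subst h0; decide
  by_cases h2 : L = 2
  · subst h2; decide
  have hL3 : 3 ≤ L := by omega
  obtain ⟨N, rfl⟩ : ∃ N : Nat, L = (N:Int) := ⟨L.toNat, (Int.toNat_of_nonneg hL).symm⟩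
  have hN3 : 3 ≤ N := by exact_mod_cast hL3
  simp only [countTilingPatterns, if_neg h0, if_neg h2]
  rw [show ((N:Int) + 1).toNat = N + 1 from by omega,
      PySem.List.pyRange_of_pos 4 ((N:Int) + 1) (by norm_num : (0:Int) < 2),
      show (if (4:Int) < (N:Int) + 1 then (((N:Int) + 1 - 4 + 2 - 1) / 2).toNat else 0)
        = (N - 2) / 2 from by split_ifs <;> omega]
  have hval := FA_get N hN3 ((N - 2) / 2) (by omega) N le_rfl
  rw [getDA_toList _ _ _ (by omega), FA_toList, hval]
  unfold valA tileVal
  by_cases hp : N % 2 = 0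
  · rw [if_neg (by omega), if_pos (by omega), if_pos (by omega : ((N:Int)) % 2 = 0)]
    have : ((N:Int) / 2).toNat = N / 2 := by omega
    rw [this]
  · rw [if_pos (by omega), if_neg (by omega : ¬ ((N:Int)) % 2 = 0)]

lemma lemB : ∀ (L : Int), 0 ≤ L → countTilingPatterns_alt L = tileVal L := by
  intro L hL
  have hm2 : PySem.Int.mod L 2 = L % 2 := PySem.Int.mod_eq_emod_of_pos (by norm_num)
  have hfd : PySem.Int.floordiv L 2 = L / 2 := PySem.Int.floordiv_eq_ediv_of_pos (by norm_num)
  by_cases hpar : L % 2 = 0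
  · by_cases hL0 : L = 0
    · subst hL0; decide
    · have hne : ¬ (L < 0 ∨ PySem.Int.mod L 2 ≠ 0) := by rw [hm2]; omega
      have hn0 : (L / 2).toNat ≠ 0 := by omega
      simp only [countTilingPatterns_alt, if_neg hne, hfd, tileVal, if_pos hpar]
      rw [powLoop_eq _ _ _ _ le_rfl hn0, mulM_id_left,
          PySem.Int.mod_eq_emod_of_pos (by norm_num : (0:Int) < 44711)]
      show ((mpow (4, 44710, 1, 0) (L / 2).toNat).2.2.1 % 44711 * 3 +
            (mpow (4, 44710, 1, 0) (L / 2).toNat).2.2.2 % 44711) % 44711 = _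
      rw [show ((mpow (4, 44710, 1, 0) (L / 2).toNat).2.2.2 % 44711) =
            ((mpow (4, 44710, 1, 0) (L / 2).toNat).2.2.2 % 44711) * 1 from (mul_one _).symm,
          absorb, mul_one, mpow_T_val]
  · have hyes : (L < 0 ∨ PySem.Int.mod L 2 ≠ 0) := by rw [hm2]; omega
    simp only [countTilingPatterns_alt, if_pos hyes, tileVal, if_neg hpar]

-- ===== VERDICT (by name: the statement is the Claim_ definition above) =====
theorem countTilingPatterns_spec : Claim_equal_countTilingPatterns := by
  intro L _ hPre
  unfold Spec_countTilingPatterns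
  rw [lemA L hPre.1 hPre.2, lemB L hPre.1]
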